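-- pv_equiv track=rewrite | github.com/briansanchez/2d-array-rotation | django_2d_array/app/functions.py | grid_top_left_cells
-- ===== SOURCE A (Python) =====
-- import    string
--
-- alphabet  = list(string.ascii_uppercase)
--
-- def grid_top_left_cells(i, columns_copy, rows_copy):
--     cell_number          = (columns_copy * 2) + ( (rows_copy - 2) * 2)
--     top_left_number      = ((i - 1) * 7)
--     cells                = []
--     for j in range(0, i):
--         cells.append(alphabet[j]  + str(cell_number + top_left_number - 1) )
--         top_left_number  -= 7
--     return cells
-- ===== SOURCE B (Python) =====
-- import string
--
-- def grid_top_left_cells(i, columns_copy, rows_copy):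
--     # Build the list back-to-front by recursion: start at the LAST cell's number
--     # (columns_copy*2 + (rows_copy-2)*2 - 1) and prepend cells while counting UP by 7.
--     def go(j, num, acc):
--         if j < 0:
--             return acc
--         return go(j - 1, num + 7, [string.ascii_uppercase[j] + str(num)] + acc)
--     return go(i - 1, columns_copy * 2 + (rows_copy - 2) * 2 - 1, [])
-- ===== Notes on version B (the rewrite author's own statement) =====
-- stated objective: alternative
-- what changed: builds the list back-to-front by tail recursion from the highest index, prepending cells while counting the number UP by 7 from the last cell's value, instead of A's forward loop that appends while decrementing an offset accumulator
import Mathlib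
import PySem

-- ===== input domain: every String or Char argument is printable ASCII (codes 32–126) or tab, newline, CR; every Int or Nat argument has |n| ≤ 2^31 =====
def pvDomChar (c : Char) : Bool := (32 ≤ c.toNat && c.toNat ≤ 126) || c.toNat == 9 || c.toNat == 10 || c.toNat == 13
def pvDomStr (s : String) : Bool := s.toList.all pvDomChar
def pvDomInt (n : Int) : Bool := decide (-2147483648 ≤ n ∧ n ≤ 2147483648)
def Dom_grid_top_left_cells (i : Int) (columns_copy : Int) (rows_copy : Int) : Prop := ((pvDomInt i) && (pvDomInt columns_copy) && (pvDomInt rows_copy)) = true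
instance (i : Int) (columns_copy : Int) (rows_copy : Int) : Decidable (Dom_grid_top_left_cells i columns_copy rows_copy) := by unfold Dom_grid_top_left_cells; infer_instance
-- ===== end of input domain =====

-- B builds the list back-to-front by recursion, counting the cell number UP by 7
-- from the last cell's value, instead of A's forward append loop with a
-- decrementing accumulator (objective: alternative decomposition).

-- ===== PORT A =====
-- alphabet = list(string.ascii_uppercase); alphabet[j] ported as pyGet? on this list
-- (none = IndexError, excluded by Pre_; .getD "" is never reached inside Pre_)
def pvAlphabet : List String :=
  ["A","B","C","D","E","F","G","H","I","J","K","L","M",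
   "N","O","P","Q","R","S","T","U","V","W","X","Y","Z"]

def grid_top_left_cells (i : Int) (columns_copy : Int) (rows_copy : Int) : List String :=
  let cell_number := (columns_copy * 2) + ((rows_copy - 2) * 2)
  let init : List String × Int := ([], (i - 1) * 7)
  ((PySem.List.pyRange 0 i 1).foldl
    (fun st j =>
      (st.1 ++ [((PySem.List.pyGet? pvAlphabet j).getD "") ++ PySem.Int.toStr (cell_number + st.2 - 1)],
       st.2 - 7))
    init).1

-- ===== PORT B =====
-- Source B's inner recursive helper go(j, num, acc); string.ascii_uppercase[j] ported as
-- pyGet? on pvAlphabet, same IndexError domain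
def pvGoB (j : Int) (num : Int) (acc : List String) : List String :=
  if _h : j < 0 then acc
  else pvGoB (j - 1) (num + 7)
        ((((PySem.List.pyGet? pvAlphabet j).getD "") ++ PySem.Int.toStr num) :: acc)
termination_by (j + 1).toNat
decreasing_by omega

def grid_top_left_cells_alt (i : Int) (columns_copy : Int) (rows_copy : Int) : List String :=
  pvGoB (i - 1) (columns_copy * 2 + (rows_copy - 2) * 2 - 1) []

-- ===== PRECONDITION & SPEC =====
-- Pre_ excludes i > 26, where the Python A (and B) raise IndexError on the alphabet lookup
def Pre_grid_top_left_cells (i : Int) (columns_copy : Int) (rows_copy : Int) : Prop := i ≤ 26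
instance (i : Int) (columns_copy : Int) (rows_copy : Int) : Decidable (Pre_grid_top_left_cells i columns_copy rows_copy) := by unfold Pre_grid_top_left_cells; infer_instance

def pvWitness_grid_top_left_cells : Int × Int × Int := (5, 3, 4)

def Spec_grid_top_left_cells (i : Int) (columns_copy : Int) (rows_copy : Int) (out : List String) : Prop := out = grid_top_left_cells_alt i columns_copy rows_copy
instance (i : Int) (columns_copy : Int) (rows_copy : Int) (out : List String) : Decidable (Spec_grid_top_left_cells i columns_copy rows_copy out) := by unfold Spec_grid_top_left_cells; infer_instance

-- ===== CLAIM (what is proved, stated in full; the proofs are below) =====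
def Claim_equal_grid_top_left_cells : Prop := ∀ (i : Int) (columns_copy : Int) (rows_copy : Int), Dom_grid_top_left_cells i columns_copy rows_copy → Pre_grid_top_left_cells i columns_copy rows_copy → Spec_grid_top_left_cells i columns_copy rows_copy (grid_top_left_cells i columns_copy rows_copy)

-- ===== LEMMAS AND PROOFS =====

-- A's loop unrolled: after folding range(0,n) the pair is (the n labels, t - 7*n)
theorem pv_fold_eq (cn : Int) (n : Nat) (t : Int) :
    (PySem.List.pyRange 0 n 1).foldl
      (fun (st : List String × Int) j =>
        (st.1 ++ [((PySem.List.pyGet? pvAlphabet j).getD "") ++ PySem.Int.toStr (cn + st.2 - 1)],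
         st.2 - 7))
      ([], t)
    = ((PySem.List.pyRange 0 n 1).map
        (fun j => ((PySem.List.pyGet? pvAlphabet j).getD "") ++ PySem.Int.toStr (cn + (t - 7 * j) - 1)),
       t - 7 * n) := by
  induction n with
  | zero => simp [PySem.List.pyRange_one_eq_nil]
  | succ m ih =>
    have h : PySem.List.pyRange 0 ((m : Int) + 1) 1 = PySem.List.pyRange 0 m 1 ++ [(m : Int)] :=
      PySem.List.pyRange_one_succ_right (by positivity)
    rw [show ((m + 1 : Nat) : Int) = (m : Int) + 1 by push_cast; ring, h, List.foldl_append, ih,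
      List.map_append]
    simp only [List.foldl_cons, List.foldl_nil, List.map_cons, List.map_nil, Prod.mk.injEq]
    exact ⟨by simp, by ring⟩

-- B's recursion unrolled: descending from n-1 it prepends exactly the n labels
theorem pv_goB_eq (n : Nat) (num : Int) (acc : List String) :
    pvGoB ((n : Int) - 1) num acc
    = (PySem.List.pyRange 0 n 1).map
        (fun j => ((PySem.List.pyGet? pvAlphabet j).getD "")
                  ++ PySem.Int.toStr (num + 7 * ((n : Int) - 1 - j)))
      ++ acc := by
  induction n generalizing num acc with
  | zero => rw [pvGoB]; simp [PySem.List.pyRange_one_eq_nil]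
  | succ m ih =>
    rw [pvGoB]
    have hm : ¬ ((m + 1 : Nat) : Int) - 1 < 0 := by push_cast; omega
    rw [dif_neg hm]
    have hstep : ((m + 1 : Nat) : Int) - 1 - 1 = (m : Int) - 1 := by push_cast; ring
    rw [hstep, ih]
    have h : PySem.List.pyRange 0 ((m : Int) + 1) 1 = PySem.List.pyRange 0 m 1 ++ [(m : Int)] :=
      PySem.List.pyRange_one_succ_right (by positivity)
    rw [show ((m + 1 : Nat) : Int) = (m : Int) + 1 by push_cast; ring, h, List.map_append]
    simp only [List.map_cons, List.map_nil, List.append_assoc, List.cons_append, List.nil_append]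
    congr 1
    · apply List.map_congr_left; intro j _; congr 2; ring
    · have hz : num + 7 * ((m : Int) + 1 - 1 - (m : Int)) = num := by ring
      rw [hz, show ((m : Int) + 1 - 1) = (m : Int) by ring]

theorem grid_top_left_cells_eq_alt (i columns_copy rows_copy : Int) :
    grid_top_left_cells i columns_copy rows_copy = grid_top_left_cells_alt i columns_copy rows_copy := by
  unfold grid_top_left_cells grid_top_left_cells_alt
  dsimp only
  by_cases hle : i ≤ 0
  · rw [pvGoB, dif_pos (show i - 1 < 0 by omega)]
    simp [PySem.List.pyRange_one_eq_nil hle]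
  · obtain ⟨n, rfl⟩ : ∃ n : Nat, i = (n : Int) :=
      ⟨i.toNat, (Int.toNat_of_nonneg (by omega)).symm⟩
    rw [pv_fold_eq, pv_goB_eq]
    simp only [List.append_nil]
    apply List.map_congr_left
    intro j _
    congr 2
    ring

-- ===== VERDICT (by name: the statement is the Claim_ definition above) =====
theorem grid_top_left_cells_spec : Claim_equal_grid_top_left_cells := by
  intro i c r _ _
  exact grid_top_left_cells_eq_alt i c r
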